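-- pv_equiv track=rewrite | github.com/gitmarcus34/IsingModel | IsingModel_MC.py | calcNeighborList
-- ===== SOURCE A (Python) =====
-- def coordToIndex(coord, nSide):
-- 	"""Use the arity of an nSided lattice to map coordinates to index.
-- 		>>>Returns this index.
--
-- 		- Coord is an m-dimensional coordinate (m being an arbitrary integer).
-- 		- nSide is the number of elements along each coordinate axis of the lattice
-- 		  (n being an arbitrary integer).
--
-- 		We can take for example a 5 dimensional coordinate in a 16 sided lattice
-- 		such as [1,5,13, 8, 0] and convert it from the hexadecimel number 157D80 to the corresponding
-- 		decimel number-index (1*16^4 + 5*16^3 + 13*16^2 + 8*16^1 + 0*16^0) = 89747.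
--
-- 		Note that we index from 0 which is the origin coordinate [0,0,...,0].
-- 	"""
-- 	index = 0
-- 	mDim = len(coord)
-- 	for i in range(mDim):
-- 		index += coord[i]*nSide**(mDim-1-i)
-- 	return index
--
-- def indexToCoord(index, nSide, mDim):
-- 	"""Use the arity of an nSided lattice to map index to its coorisponding coordinate in the lattice.
-- 		>>>returns this coordinate
--
-- 		- nSide is the number of elements along each coordinate axis of the lattice
-- 		  (n being an arbitrary integer).
-- 		-mDim is the number of coordinates used to map each point in the lattice.
-- 		-Index is the numeric-decimel location of each element counting from 0 at the origin [0,0,...,0]; to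
-- 		1 at [0,0,...,1]; ... to nSide at [0,0,...,nSide]; to nSide+1 at [0,0,...1, nSide]; ...
-- 		to the final index nSide*nSide at [nSide, nSide,...nSide]
--
-- 		We can convert the index utilizing the arithmetic of converting from the given decimel-index to the
-- 		corresponding arity number where each digit of this number will be a corresponding coordinate of the
-- 		element.
--
--
-- 	"""
-- 	coord = []
-- 	for i in range(mDim):
-- 		coord.append((index % nSide**(mDim-i)) // nSide**(mDim-1-i))
-- 	return coord
--
-- def calcNeighborList(index, nSide, mDim):
-- 	"""return a list of neighbors' indexes for a given element at index in an n-sided lattice with m-dimensions.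
--
-- 		Neighbors will be defined as those elements that are 1 unit in both directions along every axis.
-- 		The elements at the boundaries of our lattice will be connected with elements on opposite ends
-- 		of the lattice so that each element has an equal number of neighbors (for large lattices
-- 		this will have insignifcant effects, so be weary using small lattices.)
--
-- 		For example, in a 1-D lattice each element will have neighbors to the left and right, while
-- 		the beginning and the end of the lattice will also be neighbors (like a circle).
--
-- 	"""
-- 	coord = indexToCoord(index, nSide, mDim)
-- 	nList = []
-- 	for i in range(mDim):
-- 		for shift in [-1,1]:
-- 			neighborCoord = coord.copy()
-- 			neighborCoord[i] = (neighborCoord[i]+shift)%nSide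
-- 			nList.append(coordToIndex(neighborCoord, nSide))
-- 	return nList
-- ===== SOURCE B (Python) =====
-- def calcNeighborList(index, nSide, mDim):
--     # one divmod chain: per-axis digit and stride (least-significant axis first),
--     # plus the point's own base index, all in a single pass
--     r, s = index, 1
--     base = 0
--     axes = []
--     for _ in range(max(mDim, 0)):
--         r, d = divmod(r, nSide)
--         base += d * s
--         axes.append((d, s))
--         s *= nSide
--     # a neighbor shifts one digit by +-1 (wrapping); emit most-significant axis first
--     nList = []
--     for d, s in axes:
--         nList = [base + ((d - 1) % nSide - d) * s,
--                  base + ((d + 1) % nSide - d) * s] + nList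
--     return nList
-- ===== Notes on version B (the rewrite author's own statement) =====
-- stated objective: faster
-- what changed: A converts index to a full coordinate vector and then, for each of the 2*mDim neighbors, copies the vector and re-runs the whole positional-weight sum coordToIndex (O(mDim^2) with fresh power computations); B runs one divmod chain that yields each axis digit, its stride and the point's base index in a single pass and emits each neighbor as base + (wrapped digit - digit)*stride, O(mDim).
-- outside the precondition, e.g. on calcNeighborList(-30, -2, 3): A returns [-2, -2, -8, -8, -7, -7], B returns [-2, -2, 0, 0, 1, 1]; on calcNeighborList(5, 0, 2): A raises ZeroDivisionError, B raises ZeroDivisionError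
import Mathlib
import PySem

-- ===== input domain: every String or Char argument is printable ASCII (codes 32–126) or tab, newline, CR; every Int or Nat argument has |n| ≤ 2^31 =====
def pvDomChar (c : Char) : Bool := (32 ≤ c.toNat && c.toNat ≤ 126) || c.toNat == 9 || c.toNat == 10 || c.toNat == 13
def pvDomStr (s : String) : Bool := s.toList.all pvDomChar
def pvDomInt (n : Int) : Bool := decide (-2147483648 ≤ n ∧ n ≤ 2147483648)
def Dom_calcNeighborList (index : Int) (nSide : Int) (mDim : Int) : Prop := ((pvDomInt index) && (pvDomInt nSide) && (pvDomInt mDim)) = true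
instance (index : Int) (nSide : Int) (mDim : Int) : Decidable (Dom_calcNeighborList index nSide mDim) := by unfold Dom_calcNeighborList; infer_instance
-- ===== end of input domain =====

-- B replaces A's per-axis full coordinate-vector round trip (indexToCoord + a fresh
-- coordToIndex per neighbor, O(mDim^2)) by one divmod chain that yields each axis digit,
-- stride and the base index in a single pass, O(mDim); equivalence is proved for 0 < nSide
-- (or mDim ≤ 0), the lattice's natural domain.

-- ===== PORT A =====
def coordToIndexA (coord : List Int) (nSide : Int) : Int :=
  let mDim : Int := coord.length
  -- for i in range(mDim): index += coord[i]*nSide**(mDim-1-i)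
  -- (the exponent mDim-1-i is ≥ 0 for every i the loop visits, so `.toNat` is exact)
  (PySem.List.pyRange 0 mDim 1).foldl
    (fun index i => index + PySem.List.pyGetD coord i 0 * nSide ^ (mDim - 1 - i).toNat) 0

def indexToCoordA (index : Int) (nSide : Int) (mDim : Int) : List Int :=
  -- for i in range(mDim): coord.append((index % nSide**(mDim-i)) // nSide**(mDim-1-i))
  -- (both exponents are ≥ 0 inside the loop, so `.toNat` is exact)
  (PySem.List.pyRange 0 mDim 1).foldl
    (fun coord i =>
      coord ++ [PySem.Int.floordiv (PySem.Int.mod index (nSide ^ (mDim - i).toNat))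
                  (nSide ^ (mDim - 1 - i).toNat)]) []

def calcNeighborList (index : Int) (nSide : Int) (mDim : Int) : List Int :=
  let coord := indexToCoordA index nSide mDim
  (PySem.List.pyRange 0 mDim 1).foldl
    (fun nList i =>
      ([-1, 1] : List Int).foldl
        (fun nList shift =>
          -- neighborCoord = coord.copy(); neighborCoord[i] = (neighborCoord[i]+shift)%nSide
          let neighborCoord :=
            PySem.List.pySetD coord i (PySem.Int.mod (PySem.List.pyGetD coord i 0 + shift) nSide)
          nList ++ [coordToIndexA neighborCoord nSide]) nList) []

-- ===== PORT B =====
def calcNeighborList_alt (index : Int) (nSide : Int) (mDim : Int) : List Int :=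
  -- one divmod chain: r, s = index, 1; base = 0; axes = []
  -- for _ in range(max(mDim,0)): r, d = divmod(r, nSide); base += d*s; axes.append((d, s)); s *= nSide
  let st := (PySem.List.pyRange 0 mDim 1).foldl
    (fun (p : Int × Int × Int × List (Int × Int)) _ =>
      let d := PySem.Int.mod p.1 nSide
      (PySem.Int.floordiv p.1 nSide, p.2.1 * nSide, p.2.2.1 + d * p.2.1, p.2.2.2 ++ [(d, p.2.1)]))
    (index, 1, 0, [])
  let base := st.2.2.1
  -- for d, s in axes: nList = [base + ((d-1)%nSide - d)*s, base + ((d+1)%nSide - d)*s] + nList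
  st.2.2.2.foldl
    (fun nList ds =>
      [base + (PySem.Int.mod (ds.1 - 1) nSide - ds.1) * ds.2,
       base + (PySem.Int.mod (ds.1 + 1) nSide - ds.1) * ds.2] ++ nList) []

-- ===== PRECONDITION & SPEC =====
-- Pre_ restricts to the lattice's natural domain: a positive side length (or an empty
-- dimension count, where both return []). For mDim > 0, nSide = 0 makes A raise
-- ZeroDivisionError, and nSide < 0 makes A's digit arithmetic produce meaningless
-- "neighbors" of a nonsensical negative-sided lattice, which B does not reproduce.
def Pre_calcNeighborList (index : Int) (nSide : Int) (mDim : Int) : Prop :=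
  0 < nSide ∨ mDim ≤ 0
instance (index : Int) (nSide : Int) (mDim : Int) : Decidable (Pre_calcNeighborList index nSide mDim) := by unfold Pre_calcNeighborList; infer_instance

def pvWitness_calcNeighborList : Int × Int × Int := (5, 3, 2)

def Spec_calcNeighborList (index : Int) (nSide : Int) (mDim : Int) (out : List Int) : Prop := out = calcNeighborList_alt index nSide mDim
instance (index : Int) (nSide : Int) (mDim : Int) (out : List Int) : Decidable (Spec_calcNeighborList index nSide mDim out) := by unfold Spec_calcNeighborList; infer_instance

-- ===== CLAIM (what is proved, stated in full; the proofs are below) =====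
def Claim_equal_calcNeighborList : Prop := ∀ (index : Int) (nSide : Int) (mDim : Int), Dom_calcNeighborList index nSide mDim → Pre_calcNeighborList index nSide mDim → Spec_calcNeighborList index nSide mDim (calcNeighborList index nSide mDim)

-- ===== LEMMAS AND PROOFS =====

-- the k-th base-nSide digit of index (least-significant first), A's indexToCoord formula
def pvDigit (index n : Int) (k : Nat) : Int := index % n ^ (k + 1) / n ^ k
-- the index of the point itself, as both ports recompute it
def pvBase (index n : Int) (m : Nat) : Int := ∑ j ∈ Finset.range m, pvDigit index n j * n ^ j
-- the neighbor index obtained by shifting axis j (least-significant = 0)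
def pvEntry (index n : Int) (m j : Nat) (shift : Int) : Int :=
  pvBase index n m + ((pvDigit index n j + shift) % n - pvDigit index n j) * n ^ j
-- the common normal form of both outputs: most-significant axis first, shift -1 then +1
def pvSpecList (index n : Int) (m : Nat) : List Int :=
  (List.range m).flatMap (fun i => [pvEntry index n m (m - 1 - i) (-1), pvEntry index n m (m - 1 - i) 1])

theorem pvDigit_eq (a n : Int) (hn : 0 < n) (k : Nat) : a / n ^ k % n = pvDigit a n k := by
  have hpk : (0:Int) < n ^ k := pow_pos hn k
  have h2 : a / n ^ k / n = a / n ^ (k+1) := by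
    rw [Int.ediv_ediv_of_nonneg (le_of_lt hpk), pow_succ]
  have h3 : a % n ^ (k+1) = a + n ^ k * (-(n * (a / n ^ (k+1)))) := by
    rw [Int.emod_def, pow_succ]; ring
  unfold pvDigit
  rw [Int.emod_def (a / n ^ k) n, h2, h3, Int.add_mul_ediv_left a _ (ne_of_gt hpk)]
  ring

theorem pv_bfold (index n : Int) (hn : 0 < n) (k : Nat) :
    (List.range k).foldl (fun (p : Int × Int × Int × List (Int × Int)) _ =>
        (PySem.Int.floordiv p.1 n, p.2.1 * n, p.2.2.1 + (PySem.Int.mod p.1 n) * p.2.1,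
         p.2.2.2 ++ [(PySem.Int.mod p.1 n, p.2.1)]))
      (index, 1, 0, []) =
    (index / n ^ k, n ^ k, pvBase index n k,
     (List.range k).map (fun j => (pvDigit index n j, n ^ j))) := by
  induction k with
  | zero => simp [pvBase]
  | succ k ih =>
    rw [List.range_succ, List.foldl_append, ih]
    simp only [List.foldl_cons, List.foldl_nil]
    rw [PySem.Int.floordiv_eq_ediv_of_pos hn, PySem.Int.mod_eq_emod_of_pos hn,
      Int.ediv_ediv_of_nonneg (le_of_lt (pow_pos hn k)), ← pow_succ,
      pvDigit_eq index n hn k]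
    simp [pvBase, Finset.sum_range_succ, pow_succ]

theorem pv_prepend_fold {α : Type} (g : α → List Int) (xs : List α) (init : List Int) :
    xs.foldl (fun l x => g x ++ l) init = xs.reverse.flatMap g ++ init := by
  induction xs generalizing init with
  | nil => simp
  | cons x xs ih => simp [ih]

theorem pv_reverse_range (m : Nat) :
    (List.range m).reverse = (List.range m).map (fun i => m - 1 - i) := by
  apply List.ext_getElem
  · simp
  · intro i h1 h2
    simp at h1 ⊢

theorem calcNeighborList_alt_eq_spec (index n : Int) (m : Int) (hn : 0 < n) (_hm : 0 ≤ m) :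
    calcNeighborList_alt index n m = pvSpecList index n m.toNat := by
  unfold calcNeighborList_alt
  rw [PySem.List.pyRange_one]
  simp only [sub_zero, List.foldl_map]
  rw [pv_bfold index n hn m.toNat]
  simp only []
  rw [List.foldl_map, pv_prepend_fold, pv_reverse_range, List.flatMap_map]
  unfold pvSpecList
  rw [List.append_nil]
  congr 1
  funext i
  simp only [pvEntry, sub_eq_add_neg, PySem.Int.mod_eq_emod_of_pos hn]

theorem pv_coord_eq (index n : Int) (m : Int) (hn : 0 < n) (hm : 0 ≤ m) :
    indexToCoordA index n m =
      (List.range m.toNat).map (fun k => pvDigit index n (m.toNat - 1 - k)) := by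
  unfold indexToCoordA
  rw [PySem.List.pyRange_one]
  simp only [sub_zero, List.foldl_map, PySem.List.foldl_append_singleton_eq_map]  -- hope shape fits
  rw [List.nil_append]
  apply List.map_congr_left
  intro k hk
  rw [List.mem_range] at hk
  have e1 : (m - (0 + (k:Int))).toNat = (m.toNat - 1 - k) + 1 := by omega
  have e2 : (m - 1 - (0 + (k:Int))).toNat = m.toNat - 1 - k := by omega
  rw [e1, e2, PySem.Int.floordiv_eq_ediv_of_pos (pow_pos hn _),
    PySem.Int.mod_eq_emod_of_pos (pow_pos hn _)]
  rfl

-- step 2: coordToIndex is the weighted digit sum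

theorem pv_cti_eq (c : List Int) (n : Int) :
    coordToIndexA c n =
      ∑ j ∈ Finset.range c.length, c.getD j 0 * n ^ (c.length - 1 - j) := by
  simp only [coordToIndexA]
  rw [PySem.List.pyRange_one]
  simp only [sub_zero, List.foldl_map, PySem.List.foldl_add, zero_add]
  rw [show (((c.length : Int))).toNat = c.length by omega]
  have h : ∀ k ∈ List.range c.length,
      PySem.List.pyGetD c ((k:Int)) 0 * n ^ (((c.length:Int)) - 1 - (k:Int)).toNat
        = c.getD k 0 * n ^ (c.length - 1 - k) := by
    intro k hk
    rw [List.mem_range] at hk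
    rw [PySem.List.pyGetD_natCast,
      show (((c.length:Int)) - 1 - (k:Int)).toNat = c.length - 1 - k by omega]
  rw [List.map_congr_left h]
  rfl

theorem pv_entry_eq (index n : Int) (hn : 0 < n) (m' k : Nat) (hk : k < m') (shift : Int) :
    coordToIndexA
      (PySem.List.pySetD ((List.range m').map (fun j => pvDigit index n (m' - 1 - j))) (k:Int)
        (PySem.Int.mod
          (PySem.List.pyGetD ((List.range m').map (fun j => pvDigit index n (m' - 1 - j))) (k:Int) 0 + shift) n))
      n = pvEntry index n m' (m' - 1 - k) shift := by
  set c : List Int := (List.range m').map (fun j => pvDigit index n (m' - 1 - j)) with hc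
  have hlen : c.length = m' := by simp [hc]
  have hgd : ∀ j, j < m' → c.getD j 0 = pvDigit index n (m' - 1 - j) := by
    intro j hj
    rw [List.getD_eq_getElem c 0 (by omega)]
    simp [hc]
  rw [PySem.List.pyGetD_natCast, PySem.List.pySetD_natCast, hgd k hk]
  set d : Int := pvDigit index n (m' - 1 - k) with hd
  set v : Int := PySem.Int.mod (d + shift) n with hv
  rw [pv_cti_eq]
  have hlen2 : (c.set k v).length = m' := by simp [hlen]
  rw [hlen2]
  have hterm : ∀ j ∈ Finset.range m',
      (c.set k v).getD j 0 * n ^ (m' - 1 - j)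
        = c.getD j 0 * n ^ (m' - 1 - j) + (if k = j then (v - d) * n ^ (m' - 1 - k) else 0) := by
    intro j hj
    rw [Finset.mem_range] at hj
    rw [List.getD_eq_getElem _ 0 (by omega), List.getD_eq_getElem _ 0 (by omega),
      List.getElem_set]
    by_cases h : k = j
    · subst h
      rw [if_pos rfl, if_pos rfl]
      have hkc : k < c.length := by omega
      rw [← List.getD_eq_getElem c 0 hkc, hgd k hj]
      ring
    · rw [if_neg h, if_neg h]
      ring
  rw [Finset.sum_congr rfl hterm, Finset.sum_add_distrib, Finset.sum_ite_eq]
  have hbase : ∑ j ∈ Finset.range m', c.getD j 0 * n ^ (m' - 1 - j) = pvBase index n m' := by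
    rw [pvBase, ← Finset.sum_range_reflect (fun j => pvDigit index n j * n ^ j) m']
    apply Finset.sum_congr rfl
    intro j hj
    rw [Finset.mem_range] at hj
    rw [hgd j hj]
  rw [hbase]
  simp only [Finset.mem_range, hk, if_pos, pvEntry, hv, hd,
    PySem.Int.mod_eq_emod_of_pos hn]

theorem calcNeighborList_eq_spec (index n : Int) (m : Int) (hn : 0 < n) (hm : 0 ≤ m) :
    calcNeighborList index n m = pvSpecList index n m.toNat := by
  simp only [calcNeighborList]
  rw [pv_coord_eq index n m hn hm]
  simp only [List.foldl_cons, List.foldl_nil]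
  rw [PySem.List.pyRange_one]
  simp only [sub_zero, List.foldl_map, zero_add]
  simp only [List.append_assoc, List.singleton_append]
  rw [PySem.List.foldl_append_eq_flatMap, List.nil_append, pvSpecList]
  apply List.flatMap_congr
  intro k hk
  rw [List.mem_range] at hk
  rw [pv_entry_eq index n hn m.toNat k hk (-1), pv_entry_eq index n hn m.toNat k hk 1]

theorem calcNeighborList_neg_dim (index n m : Int) (hm : m ≤ 0) :
    calcNeighborList index n m = [] ∧ calcNeighborList_alt index n m = [] := by
  constructor <;>
    simp [calcNeighborList, calcNeighborList_alt, indexToCoordA,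
      PySem.List.pyRange_one_eq_nil hm]

-- ===== VERDICT (by name: the statement is the Claim_ definition above) =====
theorem calcNeighborList_spec : Claim_equal_calcNeighborList := by
  intro index nSide mDim _ hpre
  unfold Spec_calcNeighborList
  rcases le_or_gt mDim 0 with hm | hm
  · rcases calcNeighborList_neg_dim index nSide mDim hm with ⟨h1, h2⟩
    rw [h1, h2]
  · rcases hpre with hn | hn
    · rw [calcNeighborList_eq_spec index nSide mDim hn (le_of_lt hm),
        calcNeighborList_alt_eq_spec index nSide mDim hn (le_of_lt hm)]
    · omega
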